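-- pv_equiv track=rewrite | github.com/Orinav/Python | ממן 12 - 100/mmn12.py | biggest_sum_row
-- ===== SOURCE A (Python) =====
-- def biggest_sum(lst):
--     '''
--     Description:
--     The function will get a list and will return the biggest sum of numbers inside the list that are between two zeros.
--
--     Parameters:
--     lst - List.
--
--     Variables:
--     current_sum - The current sum between two zeros.
--     max_sum - The biggest sum between two zeros.
--     zero_flag - Will be False if we didn't encounter any zero, True otherwise.
--
--     Output:
--     If the input is invalid - The function will raise TypeError message.
--     If the input is valid - The function will return the biggest sum of numbers inside the list that are between two zeros.
--     '''
--     for element in lst: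
--         if type(element) != int or element < 0:
--                 raise TypeError("All the elements in lst must be an integers that are bigger or equal to 0")
--
--     current_sum = 0
--     max_sum = 0
--     zero_flag = False
--
--     for element in lst:
--         if element == 0 and zero_flag == False:
--             zero_flag = True
--             continue
--         elif element == 0 and zero_flag == True:
--             max_sum = max(max_sum, current_sum)
--             current_sum = 0
--             continue
--
--         if zero_flag == True:
--             current_sum += element
--
--     return max_sum
--
-- def biggest_sum_row(mat):
--     '''
--     Functions used:
--     biggest_sum.
--
--     Description:
--     The function will get a 2D list and will return the index of the row with the biggest sum.
--
--     Parameters: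
--     mat - 2D list
--
--     Variables:
--     row_index - The index of the list with the biggest sum.
--     max_sum - The biggest list sum.
--     row_sum - The current row sum.
--
--     Output:
--     If the input is invalid - The function will raise TypeError message.
--     If the input is valid - The function will return the index of the row with the biggest sum.
--     '''
--     row_index = 0
--     max_sum = 0
--     row_sum = 0
--     try:
--         for i in range(len(mat)):
--             row_sum = biggest_sum(mat[i])
--             if max_sum < max(max_sum, row_sum):
--                 max_sum = row_sum
--                 row_index = i
--         return row_index
--     except:
--         return -1
-- ===== SOURCE B (Python) =====
-- def biggest_sum_row(mat):
--     # validate everything up front: any bad element anywhere makes A return -1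
--     for row in mat:
--         for e in row:
--             if type(e) != int or e < 0:
--                 return -1
--     best_index = 0
--     best = 0
--     for i, row in enumerate(mat):
--         # split the row on zeros; segments strictly between two zeros are segs[1:]
--         segs = []
--         cur = []
--         for e in row:
--             if e == 0:
--                 segs.append(cur)
--                 cur = []
--             else:
--                 cur.append(e)
--         s = max([0] + [sum(seg) for seg in segs[1:]])
--         if s > best:
--             best = s
--             best_index = i
--     return best_index
-- ===== Notes on version B (the rewrite author's own statement) =====
-- stated objective: simpler
-- what changed: Replaces A's per-row zero-flag running-sum state machine with splitting each row on zeros and taking max over interior segment sums, and hoists the per-row element validation (which A turns into -1 via try/except) into one up-front scan returning -1.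
import Mathlib
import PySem

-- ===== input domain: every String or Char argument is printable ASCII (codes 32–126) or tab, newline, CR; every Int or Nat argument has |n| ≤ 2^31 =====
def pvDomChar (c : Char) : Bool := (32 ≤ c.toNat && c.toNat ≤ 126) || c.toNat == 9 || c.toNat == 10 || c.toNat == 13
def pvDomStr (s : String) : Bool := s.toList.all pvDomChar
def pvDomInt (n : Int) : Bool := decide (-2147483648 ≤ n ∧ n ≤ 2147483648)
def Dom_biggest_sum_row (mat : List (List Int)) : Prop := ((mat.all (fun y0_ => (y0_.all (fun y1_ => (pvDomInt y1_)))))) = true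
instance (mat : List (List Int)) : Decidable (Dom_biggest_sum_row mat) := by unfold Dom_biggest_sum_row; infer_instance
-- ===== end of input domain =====

-- B replaces A's zero-flag state machine by splitting each row on zeros and maxing the
-- interior segment sums, and hoists A's per-row validation (negative element → -1) to one
-- up-front scan; objective: simpler, same asymptotic cost.

-- ===== PORT A =====
-- biggest_sum: none = the TypeError raise (element < 0; type(e) != int never fires on Int inputs)
def pvBsA (lst : List Int) : Option Int :=
  if lst.any (fun e => decide (e < 0)) then none
  else
    let st := lst.foldl (fun (st : Int × Int × Bool) e =>
      if e = 0 ∧ st.2.2 = false then (st.1, st.2.1, true)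
      else if e = 0 ∧ st.2.2 = true then (0, max st.2.1 st.1, true)
      else if st.2.2 = true then (st.1 + e, st.2.1, st.2.2)
      else st) ((0 : Int), (0 : Int), false)
    some st.2.1

-- the try-body loop over range(len(mat)); any exception (none) yields -1
def pvRowLoopA : List (List Int) → Nat → Int → Int → Int
  | [], _, row_index, _ => row_index
  | r :: rs, i, row_index, max_sum =>
    match pvBsA r with
    | none => -1
    | some row_sum =>
      if max_sum < max max_sum row_sum then pvRowLoopA rs (i + 1) (i : Int) row_sum
      else pvRowLoopA rs (i + 1) row_index max_sum

def biggest_sum_row (mat : List (List Int)) : Int :=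
  pvRowLoopA mat 0 0 0

-- ===== PORT B =====
-- split a row on zeros: returns (closed segments, trailing open segment)
def pvSegsB (row : List Int) : List (List Int) × List Int :=
  row.foldl (fun (st : List (List Int) × List Int) e =>
    if e = 0 then (st.1 ++ [st.2], []) else (st.1, st.2 ++ [e])) ([], [])

-- max([0] + [sum(seg) for seg in segs[1:]])
def pvRowValB (row : List Int) : Int :=
  (PySem.List.max? ((0 : Int) :: ((pvSegsB row).1.drop 1).map (fun s => s.sum)) (fun y => y)).getD 0

def biggest_sum_row_alt (mat : List (List Int)) : Int :=
  if mat.any (fun row => row.any (fun e => decide (e < 0))) then -1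
  else
    ((PySem.List.enumerate mat 0).foldl (fun (st : Int × Int) p =>
      if st.2 < pvRowValB p.2 then (p.1, pvRowValB p.2) else st) ((0 : Int), (0 : Int))).1

-- ===== PRECONDITION & SPEC =====
def Spec_biggest_sum_row (mat : List (List Int)) (out : Int) : Prop := out = biggest_sum_row_alt mat
instance (mat : List (List Int)) (out : Int) : Decidable (Spec_biggest_sum_row mat out) := by unfold Spec_biggest_sum_row; infer_instance

-- ===== CLAIM (what is proved, stated in full; the proofs are below) =====
def Claim_equal_biggest_sum_row : Prop := ∀ (mat : List (List Int)), Dom_biggest_sum_row mat → Spec_biggest_sum_row mat (biggest_sum_row mat)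

-- ===== LEMMAS AND PROOFS =====

-- max over the sums of the closed interior segments, as A's running max computes it
def pvMaxOver (segs : List (List Int)) : Int :=
  ((segs.drop 1).map (fun s => s.sum)).foldl max 0

theorem pvRowValB_eq (row : List Int) : pvRowValB row = pvMaxOver (pvSegsB row).1 := by
  simp [pvRowValB, pvMaxOver, PySem.List.max?_id_cons]

-- loop invariant linking A's (current_sum, max_sum, zero_flag) with B's (segs, cur)
theorem pvLoop_rel (row : List Int) :
    ∀ (segs : List (List Int)) (cur : List Int) (flag : Bool),
      (flag = true ↔ segs ≠ []) →
      (row.foldl (fun (st : Int × Int × Bool) e =>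
        if e = 0 ∧ st.2.2 = false then (st.1, st.2.1, true)
        else if e = 0 ∧ st.2.2 = true then (0, max st.2.1 st.1, true)
        else if st.2.2 = true then (st.1 + e, st.2.1, st.2.2)
        else st) ((if flag then cur.sum else 0), pvMaxOver segs, flag)).2.1
      = pvMaxOver (row.foldl (fun (st : List (List Int) × List Int) e =>
          if e = 0 then (st.1 ++ [st.2], []) else (st.1, st.2 ++ [e])) (segs, cur)).1 := by
  induction row with
  | nil => intro segs cur flag hf; simp
  | cons e rest ih =>
    intro segs cur flag hf
    by_cases he : e = 0
    · cases flag with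
      | false =>
        have hsegs : segs = [] := by
          by_contra h; exact absurd (hf.mpr h) (by simp)
        subst hsegs; subst he
        simpa [pvMaxOver] using ih [cur] [] true (by simp)
      | true =>
        have hsegs : segs ≠ [] := hf.mp rfl
        subst he
        have h2 : pvMaxOver (segs ++ [cur]) = max (pvMaxOver segs) cur.sum := by
          obtain ⟨s, ss, rfl⟩ := List.exists_cons_of_ne_nil hsegs
          simp [pvMaxOver, List.foldl_append]
        have := ih (segs ++ [cur]) [] true (by simp)
        simp only [List.foldl_cons]
        simpa [h2] using this
    · cases flag with
      | false =>
        simpa [he] using ih segs (cur ++ [e]) false hf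
      | true =>
        have := ih segs (cur ++ [e]) true hf
        simp only [List.foldl_cons]
        simpa [he] using this
  
-- on a row with no negative element, A's biggest_sum returns B's per-row value
theorem pvBsA_eq (row : List Int) (h : ¬ row.any (fun e => decide (e < 0))) :
    pvBsA row = some (pvRowValB row) := by
  have := pvLoop_rel row [] [] false (by simp)
  simp only [pvBsA, if_neg h, pvRowValB_eq]
  simpa [pvMaxOver, pvSegsB] using congrArg some this

-- if some row contains a negative element, A's loop hits the raise and returns -1
theorem pvRowLoopA_neg : ∀ (mat : List (List Int)) (i : Nat) (ri mx : Int),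
    (mat.any (fun row => row.any (fun e => decide (e < 0)))) = true →
    pvRowLoopA mat i ri mx = -1 := by
  intro mat
  induction mat with
  | nil => simp
  | cons r rs ih =>
    intro i ri mx h
    by_cases hr : r.any (fun e => decide (e < 0))
    · simp [pvRowLoopA, pvBsA, hr]
    · have hrs : rs.any (fun row => row.any (fun e => decide (e < 0))) = true := by
        simpa [hr] using h
      rw [pvRowLoopA, pvBsA_eq r hr]
      dsimp only
      split <;> exact ih _ _ _ hrs

-- if no row contains a negative element, A's loop matches B's enumerate fold
theorem pvRowLoopA_pos : ∀ (mat : List (List Int)) (i : Nat) (ri mx : Int),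
    (mat.any (fun row => row.any (fun e => decide (e < 0)))) = false →
    pvRowLoopA mat i ri mx
      = ((PySem.List.enumerate mat (i : Int)).foldl (fun (st : Int × Int) p =>
          if st.2 < pvRowValB p.2 then (p.1, pvRowValB p.2) else st) (ri, mx)).1 := by
  intro mat
  induction mat with
  | nil => simp [pvRowLoopA, PySem.List.enumerate_nil]
  | cons r rs ih =>
    intro i ri mx h
    have hr : (r.any (fun e => decide (e < 0))) = false := by
      simp only [List.any_cons, Bool.or_eq_false_iff] at h; exact h.1
    have hrs : (rs.any (fun row => row.any (fun e => decide (e < 0)))) = false := by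
      simp only [List.any_cons, Bool.or_eq_false_iff] at h; exact h.2
    rw [pvRowLoopA, pvBsA_eq r (by simp [hr]), PySem.List.enumerate_cons, List.foldl_cons]
    dsimp only
    have hmax : (mx < max mx (pvRowValB r)) ↔ (mx < pvRowValB r) := by omega
    by_cases hc : mx < pvRowValB r
    · rw [if_pos (hmax.mpr hc), if_pos hc]
      have := ih (i + 1) (i : Int) (pvRowValB r) hrs
      simpa [Int.add_comm, push_cast] using this
    · rw [if_neg (fun hh => hc (hmax.mp hh)), if_neg hc]
      have := ih (i + 1) ri mx hrs
      simpa [Int.add_comm, push_cast] using this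

-- ===== VERDICT (by name: the statement is the Claim_ definition above) =====
theorem biggest_sum_row_spec : Claim_equal_biggest_sum_row := by
  intro mat _
  unfold Spec_biggest_sum_row biggest_sum_row biggest_sum_row_alt
  by_cases h : mat.any (fun row => row.any (fun e => decide (e < 0)))
  · rw [if_pos h]; exact pvRowLoopA_neg mat 0 0 0 h
  · rw [if_neg h]
    simpa using pvRowLoopA_pos mat 0 0 0 (by simpa using h)
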